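-- pv_equiv track=rewrite | github.com/abhijyotiba/Flusso-Automation | app/tools/product_search.py | _looks_like_model_number
-- ===== SOURCE A (Python) =====
-- def _looks_like_model_number(text: str) -> bool:
--     """
--     Heuristic: detect if a string looks like a model/part number.
--     Examples: "100.1170", "160.1168-9862", "HS6270MB"
--     """
--     if not text:
--         return False
--
--     s = text.strip()
--     if len(s) > 30:
--         return False
--
--     # Allow letters, digits, dot, dash, slash
--     if not all(ch.isalnum() or ch in ".-/" for ch in s):
--         return False
--
--     # Require at least one digit
--     if not any(ch.isdigit() for ch in s):
--         return False
--
--     return True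
-- ===== SOURCE B (Python) =====
-- def _looks_like_model_number(text: str) -> bool:
--     # Two-state recursive automaton over the stripped string:
--     # state 1 (_need_digit): scanning while no digit has been seen yet;
--     # state 2 (_rest_valid): a digit was seen, only validity remains to check.
--     if not text:
--         return False
--     s = text.strip()
--     if len(s) > 30:
--         return False
--     return _need_digit(s)
--
--
-- def _need_digit(s: str) -> bool:
--     if not s:
--         return False  # ran out of characters without seeing a digit
--     ch = s[0]
--     if not (ch.isalnum() or ch in ".-/"):
--         return False
--     if ch.isdigit():
--         return _rest_valid(s[1:])
--     return _need_digit(s[1:])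
--
--
-- def _rest_valid(s: str) -> bool:
--     if not s:
--         return True
--     ch = s[0]
--     if not (ch.isalnum() or ch in ".-/"):
--         return False
--     return _rest_valid(s[1:])
-- ===== Notes on version B (the rewrite author's own statement) =====
-- stated objective: alternative
-- what changed: Replaces A's staged all(...)/any(...) scans with a two-state recursive automaton (a 'need a digit' state that transitions on the first digit into a 'validity only' state), so no flag or second pass exists.
import Mathlib
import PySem

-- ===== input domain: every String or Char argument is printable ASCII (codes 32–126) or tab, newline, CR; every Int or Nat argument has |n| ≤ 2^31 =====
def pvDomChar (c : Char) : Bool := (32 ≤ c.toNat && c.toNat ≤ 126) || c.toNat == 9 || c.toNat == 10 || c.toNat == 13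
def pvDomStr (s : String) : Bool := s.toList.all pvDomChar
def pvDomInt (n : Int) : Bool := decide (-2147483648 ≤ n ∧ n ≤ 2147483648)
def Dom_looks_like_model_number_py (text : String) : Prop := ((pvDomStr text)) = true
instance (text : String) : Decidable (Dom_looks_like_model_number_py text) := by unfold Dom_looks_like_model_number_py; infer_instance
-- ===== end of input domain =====

-- B replaces A's staged all/any scans with a two-state recursive automaton; objective: alternative.

-- ===== PORT A =====
def looks_like_model_number_py (text : String) : Bool :=
  if text = "" then false
  else
    let s := PySem.Str.strip text
    if PySem.Str.len s > 30 then false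
    else if !(s.toList.all (fun ch => PySem.Chars.isalnum ch || ['.', '-', '/'].contains ch)) then false
    else if !(s.toList.any (fun ch => PySem.Chars.isdigit ch)) then false
    else true

-- ===== PORT B =====
-- state 2: a digit was already seen; only validity of the remaining chars matters
def restValid : List Char → Bool
  | [] => true
  | ch :: rest =>
    if !(PySem.Chars.isalnum ch || ['.', '-', '/'].contains ch) then false
    else restValid rest

-- state 1: no digit seen yet; transitions to restValid on the first digit
def needDigit : List Char → Bool
  | [] => false
  | ch :: rest =>
    if !(PySem.Chars.isalnum ch || ['.', '-', '/'].contains ch) then false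
    else if PySem.Chars.isdigit ch then restValid rest
    else needDigit rest

def looks_like_model_number_py_alt (text : String) : Bool :=
  if text = "" then false
  else
    let s := PySem.Str.strip text
    if PySem.Str.len s > 30 then false
    else needDigit s.toList

-- ===== PRECONDITION & SPEC =====
def Spec_looks_like_model_number_py (text : String) (out : Bool) : Prop := out = looks_like_model_number_py_alt text
instance (text : String) (out : Bool) : Decidable (Spec_looks_like_model_number_py text out) := by unfold Spec_looks_like_model_number_py; infer_instance

-- ===== CLAIM (what is proved, stated in full; the proofs are below) =====
def Claim_equal_looks_like_model_number_py : Prop := ∀ (text : String), Dom_looks_like_model_number_py text → Spec_looks_like_model_number_py text (looks_like_model_number_py text)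

-- ===== LEMMAS AND PROOFS =====

theorem restValid_eq (l : List Char) :
    restValid l = l.all (fun ch => PySem.Chars.isalnum ch || ['.', '-', '/'].contains ch) := by
  induction l with
  | nil => simp [restValid]
  | cons c cs ih =>
    simp only [restValid, List.all_cons]
    by_cases h : (PySem.Chars.isalnum c || ['.', '-', '/'].contains c) = true
    · simp [h, ih]
    · simp [Bool.not_eq_true] at h
      simp [h]

theorem needDigit_eq (l : List Char) :
    needDigit l =
      ((l.all (fun ch => PySem.Chars.isalnum ch || ['.', '-', '/'].contains ch)) &&
       (l.any (fun ch => PySem.Chars.isdigit ch))) := by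
  induction l with
  | nil => simp [needDigit]
  | cons c cs ih =>
    simp only [needDigit, List.all_cons, List.any_cons]
    by_cases h : (PySem.Chars.isalnum c || ['.', '-', '/'].contains c) = true
    · by_cases hd : PySem.Chars.isdigit c = true
      · simp [h, hd, restValid_eq]
      · simp [Bool.not_eq_true] at hd
        simp [h, hd, ih, Bool.and_assoc]
    · simp [Bool.not_eq_true] at h
      simp [h]

-- ===== VERDICT (by name: the statement is the Claim_ definition above) =====
theorem looks_like_model_number_py_spec : Claim_equal_looks_like_model_number_py := by
  intro text _
  unfold Spec_looks_like_model_number_py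
  simp only [looks_like_model_number_py, looks_like_model_number_py_alt]
  by_cases h0 : text = ""
  · rw [if_pos h0, if_pos h0]
  · rw [if_neg h0, if_neg h0]
    by_cases h1 : PySem.Str.len (PySem.Str.strip text) > 30
    · rw [if_pos h1, if_pos h1]
    · rw [if_neg h1, if_neg h1, needDigit_eq]
      cases hall : (PySem.Str.strip text).toList.all
          (fun ch => PySem.Chars.isalnum ch || ['.', '-', '/'].contains ch) <;>
        cases hany : (PySem.Str.strip text).toList.any
            (fun ch => PySem.Chars.isdigit ch) <;>
          simp [hall, hany]
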